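-- pv_equiv track=rewrite | github.com/hagalaz-star/customer-analysis-app | backend/rag/retriever.py | build_query_text
-- ===== SOURCE A (Python) =====
-- from typing import Any, Iterable, Sequence, cast
--
-- ORDERED_PROFILE_KEYS = (
--     "Age",
--     "Purchase Amount (USD)",
--     "Subscription Status",
--     "Frequency of Purchases",
-- )
--
-- def build_query_text(
--     profile: dict[str, Any] | None = None,
--     persona_name: str | None = None,
--     persona_description: str | None = None,
-- ) -> str:
--     lines: list[str] = []
--
--     if persona_name:
--         lines.append(f"persona: {persona_name}")
--     if persona_description:
--         lines.append(f"description: {persona_description}")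
--
--     # 핵심 키는 고정 순서, 나머지는 유연하게 추가
--     if profile:
--         lines.append("profile:")
--         for key in ORDERED_PROFILE_KEYS:
--             if key in profile:
--                 lines.append(f"- {key}: {profile[key]}")
--         for key, value in profile.items():
--             if key not in ORDERED_PROFILE_KEYS:
--                 lines.append(f"- {key}: {value}")
--
--     query_text = "\n".join(lines).strip()
--     if not query_text:
--         raise ValueError("Query text is empty.")
--     return query_text
-- ===== SOURCE B (Python) =====
-- ORDERED_PROFILE_KEYS = (
--     "Age",
--     "Purchase Amount (USD)",
--     "Subscription Status",
--     "Frequency of Purchases",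
-- )
--
-- def build_query_text(profile=None, persona_name=None, persona_description=None):
--     # header lines in one comprehension over labelled fields
--     head = [f"{label}: {value}"
--             for label, value in (("persona", persona_name), ("description", persona_description))
--             if value]
--     # profile body: one stable sort of the keys by their rank in ORDERED_PROFILE_KEYS
--     # (unknown keys get constant rank 4 and keep insertion order), then one emitting pass
--     body = []
--     if profile:
--         rank = {k: i for i, k in enumerate(ORDERED_PROFILE_KEYS)}
--         body = ["profile:"] + [f"- {k}: {profile[k]}"
--                                for k in sorted(profile, key=lambda k: rank.get(k, len(ORDERED_PROFILE_KEYS)))]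
--     text = "\n".join(head + body).strip()
--     if not text:
--         raise ValueError("Query text is empty.")
--     return text
-- ===== Notes on version B (the rewrite author's own statement) =====
-- stated objective: simpler
-- what changed: A's two filtered passes over the profile are replaced by one stable sort of the keys by their rank in ORDERED_PROFILE_KEYS (unknown keys get a constant rank and keep insertion order) followed by a single emitting pass, and the persona/description lines are built by one comprehension over labelled fields instead of two append-ifs.
import Mathlib
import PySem

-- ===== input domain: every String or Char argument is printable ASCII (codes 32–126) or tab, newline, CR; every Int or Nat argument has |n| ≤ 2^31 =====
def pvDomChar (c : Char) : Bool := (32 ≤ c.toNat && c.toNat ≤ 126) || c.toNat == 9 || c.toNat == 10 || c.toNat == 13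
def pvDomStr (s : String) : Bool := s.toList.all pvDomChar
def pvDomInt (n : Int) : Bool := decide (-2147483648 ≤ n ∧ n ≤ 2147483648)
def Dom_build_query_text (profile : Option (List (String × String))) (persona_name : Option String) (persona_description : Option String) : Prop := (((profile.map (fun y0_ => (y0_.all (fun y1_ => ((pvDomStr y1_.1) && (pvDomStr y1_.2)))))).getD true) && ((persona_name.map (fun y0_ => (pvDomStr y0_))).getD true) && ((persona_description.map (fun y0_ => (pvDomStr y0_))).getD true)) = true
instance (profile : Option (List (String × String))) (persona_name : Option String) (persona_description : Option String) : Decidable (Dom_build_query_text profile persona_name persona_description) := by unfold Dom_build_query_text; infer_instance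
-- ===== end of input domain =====

-- B builds the persona/description header by one comprehension over labelled fields and replaces A's
-- two filtered passes over the profile by one stable sort of the keys (rank = position in
-- ORDERED_PROFILE_KEYS, else a constant) and a single emitting pass (objective: simpler decomposition).

-- ORDERED_PROFILE_KEYS (module constant, used by both ports)
def pvOrdered : List String :=
  ["Age", "Purchase Amount (USD)", "Subscription Status", "Frequency of Purchases"]

-- ===== PORT A =====
def build_query_text (profile : Option (List (String × String))) (persona_name : Option String) (persona_description : Option String) : String :=
  let lines0 : List String := []
  let lines1 := match persona_name with
    | none => lines0
    | some s => if s = "" then lines0 else lines0 ++ ["persona: " ++ s]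
  let lines2 := match persona_description with
    | none => lines1
    | some s => if s = "" then lines1 else lines1 ++ ["description: " ++ s]
  let lines3 := match profile with
    | none => lines2
    | some l =>
      if l = [] then lines2 else
        let d : PySem.Dict String String := PySem.Dict.mk l
        let la := pvOrdered.foldl
          (fun acc key => if d.contains key then acc ++ ["- " ++ key ++ ": " ++ d.getD key ""] else acc)
          (lines2 ++ ["profile:"])
        d.items.foldl
          (fun acc kv => if !pvOrdered.contains kv.1 then acc ++ ["- " ++ kv.1 ++ ": " ++ kv.2] else acc)
          la
  -- Python raises ValueError exactly when this strips to ""; Pre_ excludes those inputs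
  PySem.Str.strip (PySem.Str.join "\n" lines3)

-- ===== PORT B =====
-- Source B's rank dict {k: i for i, k in enumerate(ORDERED_PROFILE_KEYS)} with .get(k, 4)
def pvRank (k : String) : Int :=
  PySem.Dict.getD
    (PySem.Dict.mk [("Age", 0), ("Purchase Amount (USD)", 1), ("Subscription Status", 2), ("Frequency of Purchases", 3)])
    k 4

def build_query_text_alt (profile : Option (List (String × String))) (persona_name : Option String) (persona_description : Option String) : String :=
  -- head: one comprehension over the two labelled fields, keeping truthy values
  let head : List String :=
    ([("persona", persona_name), ("description", persona_description)] : List (String × Option String)).filterMap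
      (fun lv => match lv.2 with
        | none => none
        | some v => if v = "" then none else some (lv.1 ++ ": " ++ v))
  -- body: "profile:" then one pass over the rank-sorted keys
  let body : List String :=
    match profile with
    | none => []
    | some l =>
      if l = [] then [] else
        "profile:" ::
          (PySem.List.sorted (l.map Prod.fst) pvRank false).map
            (fun k => "- " ++ k ++ ": " ++ PySem.Dict.getD (PySem.Dict.mk l) k "")
  PySem.Str.strip (PySem.Str.join "\n" (head ++ body))

-- ===== PRECONDITION & SPEC =====
-- Pre_ excludes (a) association lists with a duplicated key, which cannot arise from a Python dict
-- (the list encodes a dict), and (b) inputs with no persona, no description and an empty/missing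
-- profile, on which A raises ValueError("Query text is empty.").
def Pre_build_query_text (profile : Option (List (String × String))) (persona_name : Option String) (persona_description : Option String) : Prop :=
  ((profile.getD []).map Prod.fst).Nodup ∧
    (persona_name.getD "" ≠ "" ∨ persona_description.getD "" ≠ "" ∨ profile.getD [] ≠ [])
instance (profile : Option (List (String × String))) (persona_name : Option String) (persona_description : Option String) : Decidable (Pre_build_query_text profile persona_name persona_description) := by unfold Pre_build_query_text; infer_instance

def pvWitness_build_query_text : (Option (List (String × String))) × Option String × Option String :=
  (some [("Age", "30"), ("city", "LA")], some "vip", none)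

def Spec_build_query_text (profile : Option (List (String × String))) (persona_name : Option String) (persona_description : Option String) (out : String) : Prop := out = build_query_text_alt profile persona_name persona_description
instance (profile : Option (List (String × String))) (persona_name : Option String) (persona_description : Option String) (out : String) : Decidable (Spec_build_query_text profile persona_name persona_description out) := by unfold Spec_build_query_text; infer_instance

-- ===== CLAIM (what is proved, stated in full; the proofs are below) =====
def Claim_equal_build_query_text : Prop := ∀ (profile : Option (List (String × String))) (persona_name : Option String) (persona_description : Option String), Dom_build_query_text profile persona_name persona_description → Pre_build_query_text profile persona_name persona_description → Spec_build_query_text profile persona_name persona_description (build_query_text profile persona_name persona_description)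

-- ===== LEMMAS AND PROOFS =====

theorem pvRank_le (k : String) : pvRank k ≤ 4 := by
  simp only [pvRank, PySem.Dict.getD, PySem.Dict.get?_mk_cons]
  split_ifs <;> simp [PySem.Dict.get?]

theorem pvRank_lt_iff (k : String) : pvRank k < 4 ↔ k ∈ pvOrdered := by
  simp only [pvRank, pvOrdered, PySem.Dict.getD, PySem.Dict.get?_mk_cons]
  split_ifs with h1 h2 h3 h4
  · simp only [beq_iff_eq] at h1; subst h1; decide
  · simp only [beq_iff_eq] at h2; subst h2; decide
  · simp only [beq_iff_eq] at h3; subst h3; decide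
  · simp only [beq_iff_eq] at h4; subst h4; decide
  · simp only [beq_iff_eq] at h1 h2 h3 h4
    simp only [PySem.Dict.get?, List.find?, Option.map_none, Option.getD_none, List.mem_cons,
      List.not_mem_nil, or_false]
    constructor
    · intro habs; exact absurd habs (by omega)
    · rintro (rfl | rfl | rfl | rfl)
      · exact absurd rfl h1
      · exact absurd rfl h2
      · exact absurd rfl h3
      · exact absurd rfl h4

theorem pvRank_eq_four_iff (k : String) : pvRank k = 4 ↔ k ∉ pvOrdered := by
  have h1 := pvRank_le k
  have h2 := pvRank_lt_iff k
  constructor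
  · intro h; rw [← h2]; omega
  · intro h; rw [← h2] at h; omega

theorem pv_insertBy_append {α : Type} (b : α → α → Bool) (x : α) (l1 l2 : List α)
    (h : ∀ y ∈ l2, b x y = true) :
    PySem.List.insertBy b x (l1 ++ l2) = PySem.List.insertBy b x l1 ++ l2 := by
  induction l1 with
  | nil =>
    cases l2 with
    | nil => rfl
    | cons z zs => simp [PySem.List.insertBy, h z (by simp)]
  | cons y ys ih =>
    by_cases hb : b x y = true <;> simp [PySem.List.insertBy, hb, ih]

theorem pv_sorted_split (key : String → Int) (M : Int) (xs : List String)
    (hle : ∀ x ∈ xs, key x ≤ M) :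
    PySem.List.sorted xs key false =
      PySem.List.sorted (xs.filter (fun x => decide (key x < M))) key false ++
        xs.filter (fun x => decide (key x = M)) := by
  induction xs using List.reverseRecOn with
  | nil => rfl
  | append_singleton xs x ih =>
    have hle' : ∀ y ∈ xs, key y ≤ M := fun y hy => hle y (by simp [hy])
    have hx : key x ≤ M := hle x (by simp)
    have hsnoc : ∀ (ys : List String),
        PySem.List.sorted (ys ++ [x]) key false =
          PySem.List.insertBy (fun a c => decide (key a < key c)) x (PySem.List.sorted ys key false) := by
      intro ys; simp [PySem.List.sorted, List.foldl_append]
    rw [hsnoc, ih hle', List.filter_append, List.filter_append]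
    by_cases hxm : key x = M
    · have hlt : ¬ key x < M := by omega
      rw [PySem.List.insertBy_of_forall_not_before _ _ _ ?_]
      · simp [hxm, List.append_assoc]
      · intro y hy
        rcases List.mem_append.1 hy with h | h
        · have hyx : y ∈ xs := (List.mem_filter.1 ((PySem.List.mem_sorted _ _ _ _).1 h)).1
          have := hle' y hyx
          simp only [decide_eq_false_iff_not, not_lt]; omega
        · have := (List.mem_filter.1 h).2
          simp only [decide_eq_true_eq] at this
          simp only [decide_eq_false_iff_not, not_lt]; omega
    · have hlt : key x < M := by omega
      rw [pv_insertBy_append]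
      · simp [hxm, hlt, hsnoc]
      · intro y hy; simp at hy ⊢; omega

theorem pv_sorted_keys (keys : List String) (hnd : keys.Nodup) :
    PySem.List.sorted keys pvRank false =
      pvOrdered.filter (fun k => decide (k ∈ keys)) ++ keys.filter (fun k => !pvOrdered.contains k) := by
  rw [pv_sorted_split pvRank 4 keys (fun x _ => pvRank_le x)]
  congr 1
  · apply PySem.List.sorted_eq_of_perm_of_pairwise_lt
    · rw [List.perm_ext_iff_of_nodup (List.Nodup.filter _ (by decide)) (List.Nodup.filter _ hnd)]
      intro a
      simp [List.mem_filter, pvRank_lt_iff, and_comm]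
    · exact List.Pairwise.filter _ (by decide)
  · apply List.filter_congr
    intro k _
    simp [pvRank_eq_four_iff]

theorem pv_getD_mk_of_nodup (l : List (String × String)) (hnd : (l.map Prod.fst).Nodup)
    (k : String) (v : String) (hmem : (k, v) ∈ l) :
    PySem.Dict.getD (PySem.Dict.mk l) k "" = v := by
  induction l with
  | nil => simp at hmem
  | cons p rest ih =>
    simp only [List.map_cons, List.nodup_cons] at hnd
    rw [List.mem_cons] at hmem
    rcases hmem with h | h
    · subst h
      simp [PySem.Dict.getD, PySem.Dict.get?_mk_cons]
    · have hk : k ∈ rest.map Prod.fst := List.mem_map.2 ⟨(k, v), h, rfl⟩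
      have hne : (p.1 == k) = false := by
        rw [beq_eq_false_iff_ne]
        intro he
        subst he
        exact hnd.1 hk
      simp only [PySem.Dict.getD] at ih ⊢
      rw [PySem.Dict.get?_mk_cons, hne]
      simp only [Bool.false_eq_true, if_false]
      exact ih hnd.2 h

-- B's head comprehension equals A's two appended-if lines
theorem pv_head_eq (pn pd : Option String) :
    ([("persona", pn), ("description", pd)] : List (String × Option String)).filterMap
      (fun lv => match lv.2 with
        | none => none
        | some v => if v = "" then none else some (lv.1 ++ ": " ++ v)) =
    (match pd with
      | none => (match pn with | none => ([] : List String) | some s => if s = "" then [] else [] ++ ["persona: " ++ s])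
      | some s => if s = "" then (match pn with | none => ([] : List String) | some s => if s = "" then [] else [] ++ ["persona: " ++ s])
          else (match pn with | none => ([] : List String) | some s => if s = "" then [] else [] ++ ["persona: " ++ s]) ++ ["description: " ++ s]) := by
  cases pn with
  | none => cases pd with
    | none => rfl
    | some s => by_cases h : s = "" <;> simp [List.filterMap, h]
  | some t => cases pd with
    | none => by_cases h : t = "" <;> simp [List.filterMap, h]
    | some s =>
      by_cases h : t = "" <;> by_cases h' : s = "" <;> simp [List.filterMap, h, h']

-- ===== VERDICT (by name: the statement is the Claim_ definition above) =====
theorem build_query_text_spec : Claim_equal_build_query_text := by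
  intro profile pn pd _ hpre
  unfold Spec_build_query_text build_query_text build_query_text_alt
  rw [pv_head_eq pn pd]
  cases profile with
  | none => simp
  | some l =>
    rcases hpre with ⟨hnd, -⟩
    simp only [Option.getD_some] at hnd
    by_cases hl : l = []
    · simp [hl]
    · simp only [hl, if_false]
      congr 1
      congr 1
      -- same head prefix on both sides; compare the profile blocks
      rw [PySem.List.foldl_append_if (fun key => (PySem.Dict.mk l).contains key)
            (fun key => "- " ++ key ++ ": " ++ PySem.Dict.getD (PySem.Dict.mk l) key "")]
      simp only [PySem.List.foldl_append_if]
      rw [pv_sorted_keys (l.map Prod.fst) hnd, List.map_append]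
      have h1 : List.filter (fun key => (PySem.Dict.mk l).contains key) pvOrdered =
          List.filter (fun k => decide (k ∈ List.map Prod.fst l)) pvOrdered := by
        apply List.filter_congr
        intro k _
        rw [PySem.Dict.contains_mk, Bool.eq_iff_iff]
        simp [List.any_eq_true, beq_iff_eq, List.mem_map]
      have h2 : List.map (fun k => "- " ++ k ++ ": " ++ PySem.Dict.getD (PySem.Dict.mk l) k "")
            (List.filter (fun k => !pvOrdered.contains k) (List.map Prod.fst l)) =
          List.map (fun kv => "- " ++ kv.1 ++ ": " ++ kv.2)
            (List.filter (fun kv => !pvOrdered.contains kv.1) l) := by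
        rw [List.filter_map, List.map_map]
        apply List.map_congr_left
        intro kv hkv
        have hv := pv_getD_mk_of_nodup l hnd kv.1 kv.2 (List.mem_of_mem_filter hkv)
        simp [Function.comp, hv]
      rw [h1, h2]; simp [List.append_assoc]
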